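/- GENERATED by farm/mkstatement.py from design/units.tsv (unit `decode_residue.11`) and the assertions of Vorbis/Spec/DecodeResidue.lean — do not edit.
   THE STATEMENT of the proof unit `decode_residue.11`: segment 11 of `decode_residue` (22 instructions; entries 0x10fa53,0x10fafc,0x10fb08,0x10fb14,0x10fb20;
   exits ret; ranges 0x10fa53-0x10fa8c + 0x10fafc-0x10fb27)
   takes each of its entry assertions to one of its exit assertions (`Vorbis.Spec.DecodeResidue.Seg11`), given the contracts of its callees.
   What the names mean: Vorbis/Spec/Basic.lean (the shared hypotheses), Vorbis/Spec/DecodeResidue.lean (the assertions). The theorem to prove: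
   `theorem decode_residue_11_ok : Vorbis.Spec.decode_residue_11.Statement`. -/
import Vorbis.Spec.Alloc
import Vorbis.Spec.DecodeResidue
namespace Vorbis.Spec.decode_residue_11
open X86 X86.User Asan

/-- The statement of unit `decode_residue.11`. -/
def Statement : Prop :=
  ∀ (Lay : Layout) (_hLay : Lay.hi = 0x1000000) (μ : Microarch) (_hμ : UserX.MicroOK μ) (u₀ : State)
    (_hcode : HasCodeNat Lay u₀ Vorbis.L.decode_residue.entry Vorbis.Code.code_decode_residue.nat Vorbis.L.decode_residue.size)
    (_h_arena_temp_restore : ∀ (others : List Obj) (frames : List (Nat × FrameLayout)) (A : Arena) (dead keep : List (Nat × Nat)), Calls Lay μ Vorbis.WayInv (Vorbis.conv u₀) Vorbis.L.arena_temp_restore.entry (Vorbis.Spec.arena_temp_restore.spec others frames A dead keep)),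
    Vorbis.Spec.DecodeResidue.Seg11 Lay μ u₀

end Vorbis.Spec.decode_residue_11
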